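-- pv_equiv track=rewrite | github.com/daniel-reich/ubiquitous-fiesta | F64txHnfYj4e4MpAN_10.py | schoty
-- ===== SOURCE A (Python) =====
-- def schoty(frame):
--     included = True
--     count = 0
--     sum = 0
--     for i in range(len(frame)-1,-1,-1):
--         for each in frame[i]:
--             if each == "O" and included:
--                 count += 1
--             elif each == "-":
--                 included = False
--         included = True
--         sum += count * 10 ** (len(frame)-(i+1))
--         count = 0
--     return sum
-- ===== SOURCE B (Python) =====
-- def schoty(frame):
--     total = 0
--     for row in frame:
--         digit = 0
--         for c in row:
--             if c == "-":
--                 break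
--             if c == "O":
--                 digit += 1
--         total = total * 10 + digit
--     return total
-- ===== Notes on version B (the rewrite author's own statement) =====
-- stated objective: simpler
-- what changed: Replaces the backwards index loop with explicit 10**exponent powers by a top-to-bottom Horner fold (total = total*10 + digit), with the per-row digit computed by a simple break-on-'-' scan instead of an 'included' flag carried through the whole row.
import Mathlib
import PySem

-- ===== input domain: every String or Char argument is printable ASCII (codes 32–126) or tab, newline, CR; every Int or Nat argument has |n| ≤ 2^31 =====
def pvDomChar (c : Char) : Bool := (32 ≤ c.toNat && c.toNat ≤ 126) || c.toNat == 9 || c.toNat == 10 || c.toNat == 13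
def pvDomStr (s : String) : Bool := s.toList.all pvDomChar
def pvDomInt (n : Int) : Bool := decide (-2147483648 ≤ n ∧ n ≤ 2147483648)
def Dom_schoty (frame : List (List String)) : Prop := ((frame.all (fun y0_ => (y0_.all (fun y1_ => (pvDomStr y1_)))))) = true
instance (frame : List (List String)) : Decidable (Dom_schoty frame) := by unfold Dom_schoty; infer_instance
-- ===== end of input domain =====

-- B replaces A's backwards index loop with explicit 10**exponent by a top-to-bottom
-- Horner fold, computing each row's digit by a break-on-'-' scan (objective: simpler).


-- ===== PORT A =====
-- inner 'for each in frame[i]' body, state = (included, count)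
def schotyInner (st : Bool × Int) (each : String) : Bool × Int :=
  if each = "O" ∧ st.1 = true then (st.1, st.2 + 1)
  else if each = "-" then (false, st.2)
  else st

def schoty (frame : List (List String)) : Int :=
  -- the exponent len(frame)-(i+1) is ≥ 0 for every i the range yields, so `.toNat` is exact
  (PySem.List.pyRange ((frame.length : Int) - 1) (-1) (-1)).foldl
    (fun sum i =>
      let st := (PySem.List.pyGetD frame i []).foldl schotyInner (true, 0)
      sum + st.2 * 10 ^ ((frame.length : Int) - (i + 1)).toNat) 0

-- ===== PORT B =====
-- per-row digit: count "O" until the first "-" (the break-on-'-' scan)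
def schotyDigit (row : List String) : Int :=
  match row with
  | [] => 0
  | c :: rest => if c = "-" then 0 else (if c = "O" then 1 else 0) + schotyDigit rest

def schoty_alt (frame : List (List String)) : Int :=
  frame.foldl (fun total row => total * 10 + schotyDigit row) 0

-- ===== PRECONDITION & SPEC =====
def Spec_schoty (frame : List (List String)) (out : Int) : Prop := out = schoty_alt frame
instance (frame : List (List String)) (out : Int) : Decidable (Spec_schoty frame out) := by unfold Spec_schoty; infer_instance

-- ===== CLAIM (what is proved, stated in full; the proofs are below) =====
def Claim_equal_schoty : Prop := ∀ (frame : List (List String)), Dom_schoty frame → Spec_schoty frame (schoty frame)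

-- ===== LEMMAS AND PROOFS =====

-- once included = false, the inner loop never changes the state
theorem inner_false (row : List String) (c : Int) :
    row.foldl schotyInner (false, c) = (false, c) := by
  induction row with
  | nil => rfl
  | cons x rest ih =>
      simp only [List.foldl_cons, schotyInner]
      split_ifs with h1 h2 <;> simp_all

-- the inner loop's count from (true, c) is c + the break-scan digit
theorem inner_true (row : List String) (c : Int) :
    (row.foldl schotyInner (true, c)).2 = c + schotyDigit row := by
  induction row generalizing c with
  | nil => simp [schotyDigit]
  | cons x rest ih =>
      by_cases hO : x = "O"
      · subst hO
        have hne : ("O" : String) ≠ "-" := by decide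
        simp only [List.foldl_cons, schotyInner, schotyDigit]
        simp [hne, ih]
        ring
      · by_cases hD : x = "-"
        · subst hD
          have hne : ("-" : String) ≠ "O" := by decide
          simp only [List.foldl_cons, schotyInner, schotyDigit]
          simp [hne, inner_false]
        · simp only [List.foldl_cons, schotyInner, schotyDigit]
          simp [hO, hD, ih]

-- A's fold written as a sum over the countdown range
theorem schoty_eq_sum (frame : List (List String)) :
    schoty frame =
      ((PySem.List.pyRange ((frame.length : Int) - 1) (-1) (-1)).map
        (fun i => schotyDigit (PySem.List.pyGetD frame i []) *
          10 ^ ((frame.length : Int) - (i + 1)).toNat)).sum := by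
  unfold schoty
  rw [PySem.List.foldl_add
    (g := fun i => ((PySem.List.pyGetD frame i []).foldl schotyInner (true, 0)).2 *
      10 ^ ((frame.length : Int) - (i + 1)).toNat)]
  simp only [inner_true, zero_add]

theorem schoty_append (xs : List (List String)) (x : List String) :
    schoty (xs ++ [x]) = 10 * schoty xs + schotyDigit x := by
  rw [schoty_eq_sum, schoty_eq_sum]
  have hlen : ((xs ++ [x]).length : Int) = (xs.length : Int) + 1 := by simp
  rw [hlen]
  have hsplit : PySem.List.pyRange ((xs.length : Int) + 1 - 1) (-1) (-1)
      = (xs.length : Int) :: PySem.List.pyRange ((xs.length : Int) - 1) (-1) (-1) := by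
    have := PySem.List.pyRange_neg_one_cons (a := ((xs.length : Int) + 1 - 1)) (b := -1)
      (by omega)
    simpa using this
  rw [hsplit]
  simp only [List.map_cons, List.sum_cons]
  have hx : PySem.List.pyGetD (xs ++ [x]) (xs.length : Int) [] = x := by
    rw [PySem.List.pyGetD_eq_getElem _ [] (by omega) (by simp)]
    simp
  have hcong : ∀ i ∈ PySem.List.pyRange ((xs.length : Int) - 1) (-1) (-1),
      schotyDigit (PySem.List.pyGetD (xs ++ [x]) i []) *
          10 ^ (((xs.length : Int) + 1) - (i + 1)).toNat
        = 10 * (schotyDigit (PySem.List.pyGetD xs i []) *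
          10 ^ ((xs.length : Int) - (i + 1)).toNat) := by
    intro i hi
    rw [PySem.List.mem_pyRange_neg_one] at hi
    have h0 : 0 ≤ i := by omega
    have hlt : i < (xs.length : Int) := by omega
    have hget : PySem.List.pyGetD (xs ++ [x]) i [] = PySem.List.pyGetD xs i [] := by
      rw [PySem.List.pyGetD_eq_getElem _ [] h0 (by simp; omega),
          PySem.List.pyGetD_eq_getElem _ [] h0 (by omega)]
      rw [List.getElem_append_left (by omega)]
    have hexp : (((xs.length : Int) + 1) - (i + 1)).toNat
        = ((xs.length : Int) - (i + 1)).toNat + 1 := by omega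
    rw [hget, hexp, pow_succ]
    ring
  rw [List.map_congr_left hcong]
  rw [hx]
  have : (List.map (fun i => 10 * (schotyDigit (PySem.List.pyGetD xs i []) *
      10 ^ ((xs.length : Int) - (i + 1)).toNat))
      (PySem.List.pyRange ((xs.length : Int) - 1) (-1) (-1))).sum
      = 10 * (List.map (fun i => schotyDigit (PySem.List.pyGetD xs i []) *
      10 ^ ((xs.length : Int) - (i + 1)).toNat)
      (PySem.List.pyRange ((xs.length : Int) - 1) (-1) (-1))).sum := by
    rw [← List.sum_map_mul_left]
  rw [this]
  norm_num
  ring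

theorem alt_append (xs : List (List String)) (x : List String) :
    schoty_alt (xs ++ [x]) = 10 * schoty_alt xs + schotyDigit x := by
  unfold schoty_alt
  rw [List.foldl_append]
  simp [mul_comm]

theorem schoty_eq_alt (frame : List (List String)) : schoty frame = schoty_alt frame := by
  induction frame using List.reverseRecOn with
  | nil => rfl
  | append_singleton xs x ih =>
      rw [schoty_append, alt_append, ih]

-- ===== VERDICT (by name: the statement is the Claim_ definition above) =====
theorem schoty_spec : Claim_equal_schoty := by
  intro frame _
  exact schoty_eq_alt frame
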